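-- pv_equiv track=rewrite | github.com/sumerzhang/Func_Js_Crack | Funny_Js_Crack/74-nubiya_bbs/nubiya.py | unsbox
-- ===== SOURCE A (Python) =====
-- def unsbox(arg):
--     _0x4b082b = [0xf, 0x23, 0x1d, 0x18, 0x21, 0x10, 0x1, 0x26, 0xa, 0x9, 0x13, 0x1f, 0x28, 0x1b, 0x16, 0x17, 0x19, 0xd,
--                  0x6, 0xb, 0x27, 0x12, 0x14, 0x8, 0xe, 0x15, 0x20, 0x1a, 0x2, 0x1e, 0x7, 0x4, 0x11, 0x5, 0x3, 0x1c,
--                  0x22, 0x25, 0xc, 0x24]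
--     _0x4da0dc = [''] * 40
--     _0x12605e = ''
--     for _0x20a7bf in range(0, len(arg)):
--         _0x385ee3 = arg[_0x20a7bf]
--         for _0x217721 in range(0, len(_0x4b082b)):
--             if _0x4b082b[_0x217721] == _0x20a7bf + 0x1:
--                 _0x4da0dc[_0x217721] = _0x385ee3
--     _0x12605e = ''.join(_0x4da0dc)
--     return _0x12605e
-- ===== SOURCE B (Python) =====
-- def unsbox(arg):
--     table = [15, 35, 29, 24, 33, 16, 1, 38, 10, 9, 19, 31, 40, 27, 22, 23, 25, 13,
--              6, 11, 39, 18, 20, 8, 14, 21, 32, 26, 2, 30, 7, 4, 17, 5, 3, 28,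
--              34, 37, 12, 36]
--     return ''.join(arg[t - 1] if t - 1 < len(arg) else '' for t in table)
-- ===== Notes on version B (the rewrite author's own statement) =====
-- stated objective: faster
-- what changed: Replaces the nested loop (for each input char, inner scan of the 40-entry table for a matching slot) with a single pass over the table that indexes directly into the input string, so cost no longer grows with input length.
import Mathlib
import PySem

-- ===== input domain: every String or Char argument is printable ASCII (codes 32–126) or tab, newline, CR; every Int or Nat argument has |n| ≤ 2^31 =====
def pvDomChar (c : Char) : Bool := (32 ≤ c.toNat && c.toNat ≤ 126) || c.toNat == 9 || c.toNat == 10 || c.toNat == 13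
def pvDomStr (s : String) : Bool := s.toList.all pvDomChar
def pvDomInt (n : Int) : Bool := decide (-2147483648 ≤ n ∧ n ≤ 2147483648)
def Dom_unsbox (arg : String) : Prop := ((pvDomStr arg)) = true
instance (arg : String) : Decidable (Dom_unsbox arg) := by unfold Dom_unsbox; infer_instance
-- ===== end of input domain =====

-- B replaces A's nested loops (for each input char, scan the 40-entry table for its slot)
-- by one direct-indexing pass over the table; objective: simpler, same output.


-- ===== PORT A =====
-- the fixed lookup table _0x4b082b (hex literals written in decimal)
def pvTable : List Nat :=
  [15, 35, 29, 24, 33, 16, 1, 38, 10, 9, 19, 31, 40, 27, 22, 23, 25, 13,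
   6, 11, 39, 18, 20, 8, 14, 21, 32, 26, 2, 30, 7, 4, 17, 5, 3, 28,
   34, 37, 12, 36]

-- inner loop: for j in range(len(table)): if table[j] == i+1: slots[j] = c
def pvInnerA (v : Nat) (c : Char) (acc : List String) : List String :=
  (List.range pvTable.length).foldl
    (fun a j => if pvTable.getD j 0 = v then a.set j (String.mk [c]) else a) acc

def unsbox (arg : String) : String :=
  let cs := arg.toList
  let slots := (List.range cs.length).foldl
    (fun acc i => pvInnerA (i + 1) (cs.getD i ' ') acc) (List.replicate 40 "")
  String.join slots

-- ===== PORT B =====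
def unsbox_alt (arg : String) : String :=
  let cs := arg.toList
  String.join (pvTable.map
    (fun t => if t - 1 < cs.length then String.mk [cs.getD (t - 1) ' '] else ""))

-- ===== PRECONDITION & SPEC =====
def Spec_unsbox (arg : String) (out : String) : Prop := out = unsbox_alt arg
instance (arg : String) (out : String) : Decidable (Spec_unsbox arg out) := by unfold Spec_unsbox; infer_instance

-- ===== CLAIM (what is proved, stated in full; the proofs are below) =====
def Claim_equal_unsbox : Prop := ∀ (arg : String), Dom_unsbox arg → Spec_unsbox arg (unsbox arg)

-- ===== LEMMAS AND PROOFS =====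

-- effect of the inner set-or-skip fold, index by index
theorem pvInner_fold_getElem? (js : List Nat) (v : Nat) (s : String) (M : List String) (j : Nat) :
    (js.foldl (fun a i => if pvTable.getD i 0 = v then a.set i s else a) M)[j]? =
      if j ∈ js ∧ pvTable.getD j 0 = v ∧ j < M.length then some s else M[j]? := by
  induction js generalizing M with
  | nil => simp
  | cons i t ih =>
    simp only [List.foldl_cons]
    rw [ih]
    rcases Decidable.em (pvTable.getD i 0 = v) with hv | hv
    · rw [if_pos hv, List.length_set]
      by_cases hc : j ∈ t ∧ pvTable.getD j 0 = v ∧ j < M.length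
      · rw [if_pos hc, if_pos ⟨List.mem_cons_of_mem i hc.1, hc.2⟩]
      · rw [if_neg hc]
        by_cases hji : j = i
        · subst hji
          by_cases hlen : j < M.length
          · rw [if_pos ⟨List.mem_cons_self, hv, hlen⟩, List.getElem?_set_self hlen]
          · rw [if_neg (fun h => hlen h.2.2),
                List.getElem?_eq_none (by omega : M.length ≤ j),
                List.getElem?_eq_none (by rw [List.length_set]; omega)]
        · rw [List.getElem?_set_ne (Ne.symm hji)]
          rw [if_neg (fun h => hc ⟨(List.mem_cons.mp h.1).resolve_left hji, h.2⟩)]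
    · rw [if_neg hv]
      by_cases hc : j ∈ t ∧ pvTable.getD j 0 = v ∧ j < M.length
      · rw [if_pos hc, if_pos ⟨List.mem_cons_of_mem i hc.1, hc.2⟩]
      · rw [if_neg hc, if_neg]
        rintro ⟨h1, h2, h3⟩
        rcases List.mem_cons.mp h1 with h | h
        · exact hv (h ▸ h2)
        · exact hc ⟨h, h2, h3⟩

theorem pvInnerA_getElem? (v : Nat) (c : Char) (M : List String) (j : Nat) :
    (pvInnerA v c M)[j]? =
      if j < pvTable.length ∧ pvTable.getD j 0 = v ∧ j < M.length
      then some (String.mk [c]) else M[j]? := by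
  rw [pvInnerA, pvInner_fold_getElem?]
  simp only [List.mem_range]

-- the inner fold preserves the length of the slot list
theorem pvInner_fold_length (js : List Nat) (v : Nat) (s : String) (M : List String) :
    (js.foldl (fun a i => if pvTable.getD i 0 = v then a.set i s else a) M).length
      = M.length := by
  induction js generalizing M with
  | nil => rfl
  | cons i t ih =>
    simp only [List.foldl_cons]
    rw [ih]
    split_ifs <;> simp

-- so does the outer fold
theorem pvOuter_length (cs : List Char) (is : List Nat) (M : List String) :
    (is.foldl (fun acc i => pvInnerA (i + 1) (cs.getD i ' ') acc) M).length
      = M.length := by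
  induction is generalizing M with
  | nil => rfl
  | cons i t ih =>
    simp only [List.foldl_cons]
    rw [ih, pvInnerA, pvInner_fold_length]

-- outer loop invariant: after the first n characters, slot j holds
-- cs[table[j]-1] iff 1 ≤ table[j] ≤ n, else ""
theorem pvOuter_getElem? (cs : List Char) (n : Nat) (j : Nat) :
    ((List.range n).foldl (fun acc i => pvInnerA (i + 1) (cs.getD i ' ') acc)
        (List.replicate 40 ""))[j]? =
      if j < 40 then
        some (if 1 ≤ pvTable.getD j 0 ∧ pvTable.getD j 0 ≤ n
              then String.mk [cs.getD (pvTable.getD j 0 - 1) ' '] else "")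
      else none := by
  have hT : pvTable.length = 40 := rfl
  induction n with
  | zero =>
    by_cases hj : j < 40
    · simp only [List.range_zero, List.foldl_nil, List.getElem?_replicate, hj, if_true]
      rw [if_neg (by omega)]
    · simp only [List.range_zero, List.foldl_nil, if_neg hj]
      exact List.getElem?_eq_none (by simpa using (by omega : 40 ≤ j))
  | succ n ih =>
    rw [List.range_succ, List.foldl_append, List.foldl_cons, List.foldl_nil,
        pvInnerA_getElem?, pvOuter_length, List.length_replicate, hT]
    by_cases hj : j < 40
    · by_cases hv : pvTable.getD j 0 = n + 1
      · rw [if_pos ⟨hj, hv, hj⟩, if_pos hj, hv,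
            if_pos ⟨by omega, by omega⟩]
        norm_num
      · rw [if_neg (fun h => hv h.2.1), ih, if_pos hj, if_pos hj]
        congr 1
        by_cases h1 : 1 ≤ pvTable.getD j 0 ∧ pvTable.getD j 0 ≤ n
        · rw [if_pos h1, if_pos ⟨h1.1, by omega⟩]
        · rw [if_neg h1, if_neg (by omega)]
    · rw [if_neg (fun h => hj h.1), ih, if_neg hj, if_neg hj]

-- every table entry is at least 1
theorem pvTable_mem_pos : ∀ t ∈ pvTable, 1 ≤ t := by decide

-- the two slot lists coincide
theorem pv_slots_eq (cs : List Char) :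
    (List.range cs.length).foldl (fun acc i => pvInnerA (i + 1) (cs.getD i ' ') acc)
        (List.replicate 40 "")
      = pvTable.map (fun t => if t - 1 < cs.length
          then String.mk [cs.getD (t - 1) ' '] else "") := by
  have hT : pvTable.length = 40 := rfl
  apply List.ext_getElem?
  intro j
  rw [pvOuter_getElem?, List.getElem?_map]
  by_cases hj : j < 40
  · rw [if_pos hj]
    have hjT : j < pvTable.length := by omega
    rw [List.getElem?_eq_getElem hjT, Option.map_some,
        List.getD_eq_getElem pvTable 0 hjT]
    have h1 : 1 ≤ pvTable[j] := pvTable_mem_pos _ (pvTable.getElem_mem hjT)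
    congr 1
    by_cases hlt : pvTable[j] - 1 < cs.length
    · rw [if_pos ⟨h1, by omega⟩, if_pos hlt]
    · rw [if_neg (by omega), if_neg hlt]
  · rw [if_neg hj, List.getElem?_eq_none (by omega : pvTable.length ≤ j), Option.map_none]

-- ===== VERDICT (by name: the statement is the Claim_ definition above) =====
theorem unsbox_spec : Claim_equal_unsbox := by
  intro arg _
  unfold Spec_unsbox unsbox unsbox_alt
  exact congrArg String.join (pv_slots_eq arg.toList)
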